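-- pv_equiv track=rewrite | github.com/Vanacka/algoritmy_na_zkousku | operace_s_polynomy.py | soucet_pol
-- ===== SOURCE A (Python) =====
-- def soucet_pol(a, b):
--     c = []
--     if len(a) < len(b):
--         a, b = b, a
--     for i in range(len(b)):
--         c.append(a[i] + b[i])
--     for i in range(len(b), len(a)):
--         c.append(a[i])
--     while len(c) > 1 and c[-1] == 0:
--         c.pop()
--     return list(reversed(c))
-- ===== SOURCE B (Python) =====
-- def soucet_pol(a, b):
--     r = []
--     for i in range(max(len(a), len(b)) - 1, -1, -1):
--         h = (a[i] if i < len(a) else 0) + (b[i] if i < len(b) else 0)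
--         if r or h != 0:
--             r.append(h)
--     if not r and (a or b):
--         return [0]
--     return r
-- ===== Notes on version B (the rewrite author's own statement) =====
-- stated objective: alternative
-- what changed: B replaces A's length-swap, two forward index loops, destructive pop-trim and final reversal by a single descending-index pass that builds the result highest-degree-first directly, skipping high-degree zero coefficients until the first nonzero one (zero polynomial handled by one final check), fusing addition, trimming and reversal.
import Mathlib
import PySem

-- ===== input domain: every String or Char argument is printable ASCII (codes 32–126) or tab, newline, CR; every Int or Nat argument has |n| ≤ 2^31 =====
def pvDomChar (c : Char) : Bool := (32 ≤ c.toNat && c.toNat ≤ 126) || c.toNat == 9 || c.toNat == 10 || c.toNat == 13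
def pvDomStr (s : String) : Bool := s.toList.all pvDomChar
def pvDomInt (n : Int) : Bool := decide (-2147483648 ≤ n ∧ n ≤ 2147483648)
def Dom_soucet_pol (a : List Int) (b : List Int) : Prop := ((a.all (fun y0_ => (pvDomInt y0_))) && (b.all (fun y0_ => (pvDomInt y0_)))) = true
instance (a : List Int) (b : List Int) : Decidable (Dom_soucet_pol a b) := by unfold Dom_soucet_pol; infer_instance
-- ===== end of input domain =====

-- B replaces A's length-swap, two index loops, destructive pop-trim and final reversal by one structural
-- recursion on the lists that builds the answer highest-degree-first, fusing addition, trimming and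
-- reversal into a single pass; objective: alternative.

-- ===== PORT A =====
-- the 'while len(c) > 1 and c[-1] == 0: c.pop()' loop
def pvPopTrim (c : List Int) : List Int :=
  if c.length > 1 ∧ PySem.List.pyGetD c (-1) 0 = 0 then pvPopTrim c.dropLast else c
termination_by c.length
decreasing_by simp [List.length_dropLast]; omega

def soucet_pol (a : List Int) (b : List Int) : List Int :=
  let ab := if a.length < b.length then (b, a) else (a, b)
  let c1 := (PySem.List.pyRange 0 ab.2.length 1).foldl
    (fun c i => c ++ [PySem.List.pyGetD ab.1 i 0 + PySem.List.pyGetD ab.2 i 0]) []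
  let c2 := (PySem.List.pyRange ab.2.length ab.1.length 1).foldl
    (fun c i => c ++ [PySem.List.pyGetD ab.1 i 0]) c1
  (pvPopTrim c2).reverse

-- ===== PORT B =====
-- the descending loop 'for i in range(max(len(a),len(b))-1, -1, -1): … if r or h != 0: r.append(h)'
def soucet_pol_alt (a : List Int) (b : List Int) : List Int :=
  let n : Int := max a.length b.length
  let r := (PySem.List.pyRange (n - 1) (-1) (-1)).foldl
    (fun r i =>
      let h := (if i < (a.length : Int) then PySem.List.pyGetD a i 0 else 0) +
               (if i < (b.length : Int) then PySem.List.pyGetD b i 0 else 0)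
      if r ≠ [] ∨ h ≠ 0 then r ++ [h] else r) []
  if r = [] ∧ ¬(a = [] ∧ b = []) then [0] else r

-- ===== PRECONDITION & SPEC =====
def Spec_soucet_pol (a : List Int) (b : List Int) (out : List Int) : Prop := out = soucet_pol_alt a b
instance (a : List Int) (b : List Int) (out : List Int) : Decidable (Spec_soucet_pol a b out) := by unfold Spec_soucet_pol; infer_instance

-- ===== CLAIM (what is proved, stated in full; the proofs are below) =====
def Claim_equal_soucet_pol : Prop := ∀ (a : List Int) (b : List Int), Dom_soucet_pol a b → Spec_soucet_pol a b (soucet_pol a b)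

-- ===== LEMMAS AND PROOFS =====

-- A's padded-sum list, as built by its loops (named for the proofs)
def pvSum (a b : List Int) : List Int :=
  (PySem.List.pyRange 0 ((max a.length b.length : Nat) : Int) 1).map (fun i =>
     (if i < (a.length : Int) then PySem.List.pyGetD a i 0 else 0) +
     (if i < (b.length : Int) then PySem.List.pyGetD b i 0 else 0))

theorem pvSum_comm (a b : List Int) : pvSum a b = pvSum b a := by
  unfold pvSum
  rw [Nat.max_comm]
  exact List.map_congr_left (fun i _ => by ring)

-- A's two append loops produce the padded-sum list when a is the longer list
theorem pvMerge (a b : List Int) (h : b.length ≤ a.length) :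
    (PySem.List.pyRange (b.length : Int) (a.length : Int) 1).foldl
      (fun c i => c ++ [PySem.List.pyGetD a i 0])
      ((PySem.List.pyRange 0 (b.length : Int) 1).foldl
        (fun c i => c ++ [PySem.List.pyGetD a i 0 + PySem.List.pyGetD b i 0]) [])
    = pvSum a b := by
  rw [PySem.List.foldl_append_singleton_eq_map, PySem.List.foldl_append_singleton_eq_map]
  unfold pvSum
  rw [Nat.max_eq_left h,
    PySem.List.pyRange_one_append 0 (b.length : Int) (a.length : Int) (by positivity) (by exact_mod_cast h),
    List.map_append, List.nil_append]
  congr 1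
  · refine List.map_congr_left (fun i hi => ?_)
    rw [PySem.List.mem_pyRange_one] at hi
    have h1 : i < (a.length : Int) := lt_of_lt_of_le hi.2 (by exact_mod_cast h)
    rw [if_pos h1, if_pos hi.2]
  · refine List.map_congr_left (fun i hi => ?_)
    rw [PySem.List.mem_pyRange_one] at hi
    rw [if_pos hi.2, if_neg (by omega), add_zero]

theorem pvSum_ne_nil (a b : List Int) (h : ¬(a = [] ∧ b = [])) : pvSum a b ≠ [] := by
  intro hc
  have := congrArg List.length hc
  unfold pvSum at this
  simp [PySem.List.length_pyRange_one] at this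
  rcases a <;> rcases b <;> simp_all

-- B's skip-then-append accumulator is dropWhile of the scanned values
theorem pvSkipAppend (ys : List Int) (r : List Int) (hr : r ≠ []) :
    ys.foldl (fun r h => if r ≠ [] ∨ h ≠ 0 then r ++ [h] else r) r = r ++ ys := by
  induction ys generalizing r with
  | nil => simp
  | cons y ys ih =>
    simp only [List.foldl_cons, if_pos (Or.inl hr)]
    rw [ih (r ++ [y]) (by simp)]
    simp

theorem pvSkipAppend_nil (ys : List Int) :
    ys.foldl (fun r h => if r ≠ [] ∨ h ≠ 0 then r ++ [h] else r) []
      = ys.dropWhile (fun x => x == 0) := by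
  induction ys with
  | nil => simp
  | cons y ys ih =>
    by_cases hy : y = 0
    · subst hy
      simpa using ih
    · simp only [List.foldl_cons, if_pos (Or.inr hy), List.nil_append, List.dropWhile_cons]
      rw [if_neg (by simpa using hy), pvSkipAppend ys [y] (by simp)]
      rfl

-- A's pop loop, through the reversed list: drop leading zeros, keeping one element if nonempty
theorem pvPopTrim_reverse (s : List Int) :
    (pvPopTrim s).reverse =
      if s.reverse.dropWhile (fun x => x == 0) = [] then (if s = [] then [] else [0])
      else s.reverse.dropWhile (fun x => x == 0) := by
  generalize hn : s.length = n
  induction n using Nat.strong_induction_on generalizing s with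
  | _ n ih =>
    rw [pvPopTrim]
    by_cases hP : s.length > 1 ∧ PySem.List.pyGetD s (-1) 0 = 0
    · rw [if_pos hP]
      have hne : s ≠ [] := by intro h; subst h; simp at hP
      have hlast : s.getLast hne = 0 := by
        rw [← PySem.List.pyGetD_neg_one s 0 hne]
        exact hP.2
      have hrev : s.reverse = 0 :: s.dropLast.reverse := by
        conv_lhs => rw [← List.dropLast_concat_getLast hne]
        rw [List.reverse_append, hlast]
        rfl
      have hdne : s.dropLast ≠ [] := by
        intro h
        have := congrArg List.length h
        simp at this
        omega
      have hih := ih (s.length - 1) (by omega) s.dropLast (by simp)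
      rw [hih, hrev, if_neg hdne, if_neg hne]
      simp
    · rw [if_neg hP]
      push Not at hP
      rcases s with _ | ⟨x, s⟩
      · simp
      · rcases s with _ | ⟨y, s⟩
        · by_cases hx : x = 0
          · subst hx; simp
          · simp [hx]
        · have hlen : (x :: y :: s).length > 1 := by simp
          have hlast : PySem.List.pyGetD (x :: y :: s) (-1) 0 ≠ 0 := hP hlen
          have hne : (x :: y :: s) ≠ [] := by simp
          have hl0 : (x :: y :: s).getLast hne ≠ 0 := by
            rw [← PySem.List.pyGetD_neg_one (x :: y :: s) 0 hne]
            exact hlast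
          have hrev : (x :: y :: s).reverse
              = (x :: y :: s).getLast hne :: (x :: y :: s).dropLast.reverse := by
            conv_lhs => rw [← List.dropLast_concat_getLast hne]
            rw [List.reverse_append]
            rfl
          have hcond : (((x :: y :: s).getLast hne) == 0) = false := by
            simpa using hl0
          rw [hrev]
          simp only [List.dropWhile_cons, hcond, Bool.false_eq_true, if_false]
          rw [if_neg (by simp)]

-- ===== VERDICT (by name: the statement is the Claim_ definition above) =====
theorem soucet_pol_spec : Claim_equal_soucet_pol := by
  intro a b _
  unfold Spec_soucet_pol soucet_pol soucet_pol_alt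
  have hm : max (a.length : Int) (b.length : Int) = ((max a.length b.length : Nat) : Int) := by
    push_cast
    rfl
  have hrange : PySem.List.pyRange (max (a.length : Int) (b.length : Int) - 1) (-1) (-1)
      = (PySem.List.pyRange 0 (max (a.length : Int) (b.length : Int)) 1).reverse := by
    have := PySem.List.pyRange_neg_one_eq_reverse (max (a.length : Int) (b.length : Int) - 1) (-1)
    simpa using this
  have hB : (PySem.List.pyRange (max (a.length : Int) (b.length : Int) - 1) (-1) (-1)).foldl
      (fun r i =>
        if r ≠ [] ∨ ((if i < (a.length : Int) then PySem.List.pyGetD a i 0 else 0) +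
               (if i < (b.length : Int) then PySem.List.pyGetD b i 0 else 0)) ≠ 0 then
          r ++ [(if i < (a.length : Int) then PySem.List.pyGetD a i 0 else 0) +
               (if i < (b.length : Int) then PySem.List.pyGetD b i 0 else 0)]
        else r) []
      = (pvSum a b).reverse.dropWhile (fun x => x == 0) := by
    rw [hrange, hm]
    have hfm := List.foldl_map (f := fun i : Int =>
        (if i < (a.length : Int) then PySem.List.pyGetD a i 0 else 0) +
        (if i < (b.length : Int) then PySem.List.pyGetD b i 0 else 0))
      (g := fun (r : List Int) h => if r ≠ [] ∨ h ≠ 0 then r ++ [h] else r)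
      (l := (PySem.List.pyRange 0 ((max a.length b.length : Nat) : Int) 1).reverse) (init := ([] : List Int))
    rw [← hfm, List.map_reverse]
    exact pvSkipAppend_nil ((pvSum a b).reverse)
  have finish : (if (pvSum a b).reverse.dropWhile (fun x => x == 0) = []
        then (if pvSum a b = [] then ([] : List Int) else [0])
        else (pvSum a b).reverse.dropWhile (fun x => x == 0))
      = (if (pvSum a b).reverse.dropWhile (fun x => x == 0) = [] ∧ ¬(a = [] ∧ b = []) then [0]
        else (pvSum a b).reverse.dropWhile (fun x => x == 0)) := by
    by_cases he : a = [] ∧ b = []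
    · obtain ⟨h1, h2⟩ := he
      subst h1
      subst h2
      rfl
    · have hs := pvSum_ne_nil a b he
      by_cases hz : (pvSum a b).reverse.dropWhile (fun x => x == 0) = []
      · rw [if_pos hz, if_neg hs, if_pos ⟨hz, he⟩]
      · rw [if_neg hz, if_neg (fun hc => hz hc.1)]
  by_cases hc : a.length < b.length
  · simp only [hc, if_true]
    rw [pvMerge b a (le_of_lt hc), pvSum_comm b a, pvPopTrim_reverse, hB]
    exact finish
  · simp only [hc, if_false]
    rw [pvMerge a b (le_of_not_gt hc), pvPopTrim_reverse, hB]
    exact finish
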